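-- pv_equiv track=rewrite | github.com/pypi-data/pypi-mirror-391 | packages/agentic-fleet/agentic_fleet-0.6.0-py3-none-any.whl/agentic_fleet/workflows/supervisor_workflow.py | _prepare_subtasks
-- ===== SOURCE A (Python) =====
-- from typing import (
--     TYPE_CHECKING,
--     Any,
--     Dict,
--     List,
--     Optional,
--     Tuple,
--     TypeVar,
-- )
--
-- def _prepare_subtasks(
--     agents: List[str], subtasks: Optional[List[str]], fallback_task: str
-- ) -> List[str]:
--     """Normalize DSPy-provided subtasks to align with assigned agents."""
--     if not agents:
--         return []
--
--     normalized: List[str]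
--     if not subtasks:
--         normalized = [fallback_task for _ in agents]
--     else:
--         normalized = [str(task) for task in subtasks]
--
--     if len(normalized) < len(agents):
--         normalized.extend([fallback_task] * (len(agents) - len(normalized)))
--     elif len(normalized) > len(agents):
--         normalized = normalized[: len(agents)]
--
--     return normalized
-- ===== SOURCE B (Python) =====
-- def _prepare_subtasks(agents, subtasks, fallback_task):
--     """Normalize DSPy-provided subtasks to align with assigned agents."""
--     n = len(agents)
--     source = subtasks or []
--     return [str(source[i]) if i < len(source) else fallback_task for i in range(n)]
-- ===== Notes on version B (the rewrite author's own statement) =====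
-- stated objective: simpler
-- what changed: Replaces A's build-then-pad-then-truncate (three passes with branching on length comparison) by a single index-driven pass over range(len(agents)) picking source[i] or the fallback.
import Mathlib
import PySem

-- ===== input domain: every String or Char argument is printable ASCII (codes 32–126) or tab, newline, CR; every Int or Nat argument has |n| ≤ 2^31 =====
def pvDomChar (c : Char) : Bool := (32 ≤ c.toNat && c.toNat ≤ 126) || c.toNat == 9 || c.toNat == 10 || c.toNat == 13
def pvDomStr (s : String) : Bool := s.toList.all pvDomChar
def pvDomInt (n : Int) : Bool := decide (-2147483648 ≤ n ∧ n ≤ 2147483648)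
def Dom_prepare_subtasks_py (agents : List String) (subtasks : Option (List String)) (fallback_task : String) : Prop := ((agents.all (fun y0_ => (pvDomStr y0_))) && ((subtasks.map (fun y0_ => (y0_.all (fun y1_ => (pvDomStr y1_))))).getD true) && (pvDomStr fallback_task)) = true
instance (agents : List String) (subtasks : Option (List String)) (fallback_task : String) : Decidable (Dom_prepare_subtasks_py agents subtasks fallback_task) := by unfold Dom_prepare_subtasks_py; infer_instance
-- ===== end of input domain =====

-- B replaces A's build-then-pad-then-truncate with a single index-driven pass (objective: simpler); same return value on all inputs.


-- ===== PORT A =====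
-- Port of A: build normalized, then pad with fallback or truncate to len(agents).
def prepare_subtasks_py (agents : List String) (subtasks : Option (List String)) (fallback_task : String) : List String :=
  if agents = [] then []
  else
    let normalized : List String :=
      match subtasks with
      | none => agents.map (fun _ => fallback_task)
      | some s => if s = [] then agents.map (fun _ => fallback_task)  -- 'not subtasks' is also true for []
                  else s.map (fun task => task)                        -- str(task) on a str is the identity
    if normalized.length < agents.length then
      normalized ++ List.replicate (agents.length - normalized.length) fallback_task
    else if normalized.length > agents.length then
      normalized.take agents.length
    else normalized

-- ===== PORT B =====
-- Port of B: one index-driven pass over range(len(agents)).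
def prepare_subtasks_py_alt (agents : List String) (subtasks : Option (List String)) (fallback_task : String) : List String :=
  let n := agents.length
  let source : List String := match subtasks with | none => [] | some s => s  -- subtasks or []
  (List.range n).map (fun i => if i < source.length then source.getD i fallback_task else fallback_task)

-- ===== PRECONDITION & SPEC =====
def Spec_prepare_subtasks_py (agents : List String) (subtasks : Option (List String)) (fallback_task : String) (out : List String) : Prop := out = prepare_subtasks_py_alt agents subtasks fallback_task
instance (agents : List String) (subtasks : Option (List String)) (fallback_task : String) (out : List String) : Decidable (Spec_prepare_subtasks_py agents subtasks fallback_task out) := by unfold Spec_prepare_subtasks_py; infer_instance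

-- ===== CLAIM (what is proved, stated in full; the proofs are below) =====
def Claim_equal_prepare_subtasks_py : Prop := ∀ (agents : List String) (subtasks : Option (List String)) (fallback_task : String), Dom_prepare_subtasks_py agents subtasks fallback_task → Spec_prepare_subtasks_py agents subtasks fallback_task (prepare_subtasks_py agents subtasks fallback_task)

-- ===== LEMMAS AND PROOFS =====

-- ===== VERDICT (by name: the statement is the Claim_ definition above) =====
-- B's value, characterised pointwise.
lemma alt_eq (n : Nat) (src : List String) (fb : String) :
    (List.range n).map (fun i => if i < src.length then src.getD i fb else fb)
      = src.take n ++ List.replicate (n - src.length) fb := by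
  apply List.ext_getElem
  · simp; omega
  · intro i h1 h2
    simp only [List.length_map, List.length_range] at h1
    simp only [List.getElem_map, List.getElem_range]
    by_cases hi : i < src.length
    · rw [List.getElem_append_left (by simp; omega)]
      simp [hi, List.getD_eq_getElem?_getD, List.getElem_take]
    · rw [List.getElem_append_right (by simp; omega)]
      simp [hi]

lemma pad_eq (src : List String) (n : Nat) (fb : String) (h : src.length < n) :
    src ++ List.replicate (n - src.length) fb = src.take n ++ List.replicate (n - src.length) fb := by
  rw [List.take_of_length_le (by omega)]

theorem prepare_subtasks_py_spec : Claim_equal_prepare_subtasks_py := by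
  intro agents subtasks fallback_task _
  show prepare_subtasks_py agents subtasks fallback_task = prepare_subtasks_py_alt agents subtasks fallback_task
  unfold prepare_subtasks_py prepare_subtasks_py_alt
  by_cases ha : agents = []
  · subst ha; simp
  · simp only [if_neg ha]
    match subtasks with
    | none => simp [List.map_const']
    | some s =>
        by_cases hs : s = []
        · subst hs; simp [List.map_const']
        · simp only [if_neg hs, List.map_id_fun', id]
          rw [alt_eq]
          by_cases hlt : s.length < agents.length
          · rw [if_pos hlt, pad_eq _ _ _ hlt]
          · rw [if_neg hlt]
            by_cases hgt : s.length > agents.length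
            · rw [if_pos hgt]
              have h0 : agents.length - s.length = 0 := by omega
              simp [h0]
            · rw [if_neg hgt]
              have he : s.length = agents.length := by omega
              simp [he]
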